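-- pv_equiv track=rewrite | github.com/londrwus/leetcode_problems | easy/28.py | strStr
-- ===== SOURCE A (Python) =====
-- haystack = "mississippi"
--
-- needle = "issip"
--
-- def strStr(haystack: str, needle: str) -> int:
--     ids = []
--     if needle in haystack:
--         ids.append([int(i) for i in range(len(haystack)) if needle[0] == haystack[i]])
--         for i in range(len(ids[0])):
--             if haystack[ids[0][i]:ids[0][i]+len(needle)] == needle:
--                 return int(ids[0][i])
--
--         return -1
--     else:
--         return -1
-- ===== SOURCE B (Python) =====
-- def strStr(haystack: str, needle: str) -> int:
--     return haystack.find(needle)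
-- ===== Notes on version B (the rewrite author's own statement) =====
-- stated objective: idiomatic
-- what changed: replaces the membership test plus first-character candidate list plus per-candidate slice comparison with a single str.find call (C-implemented two-way search)
-- outside the precondition, e.g. on strStr('', ''): A returns -1, B returns 0
import Mathlib
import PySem

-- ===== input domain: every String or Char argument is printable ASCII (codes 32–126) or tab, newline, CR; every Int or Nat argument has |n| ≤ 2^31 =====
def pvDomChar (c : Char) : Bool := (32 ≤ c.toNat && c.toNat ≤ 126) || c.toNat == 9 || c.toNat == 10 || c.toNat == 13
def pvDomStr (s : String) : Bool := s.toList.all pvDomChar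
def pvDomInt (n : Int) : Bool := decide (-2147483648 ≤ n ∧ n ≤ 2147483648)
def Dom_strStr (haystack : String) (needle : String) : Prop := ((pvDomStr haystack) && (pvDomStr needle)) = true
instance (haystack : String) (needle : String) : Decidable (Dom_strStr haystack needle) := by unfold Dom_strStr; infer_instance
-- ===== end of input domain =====

-- B replaces A's membership test + first-character candidate list + per-candidate slice
-- comparison with the single library call haystack.find(needle) (the idiomatic form).

-- ===== PORT A =====
-- A's inner loop 'for i in range(len(ids[0])): if haystack[ids[0][i]:ids[0][i]+len(needle)] == needle: return ids[0][i]'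
-- ported as structural recursion over the candidate list ids0, in the same order, same slice test.
def strStrLoop (h n : List Char) : List Int → Int
  | [] => -1                      -- loop falls through: return -1
  | j :: rest =>
      if PySem.List.slice h (some j) (some (j + (n.length : Int))) = n then j
      else strStrLoop h n rest

def strStrChars (h n : List Char) : Int :=
  if PySem.Chars.isIn n h then    -- 'if needle in haystack'
    -- ids.append([int(i) for i in range(len(haystack)) if needle[0] == haystack[i]]); int(i) is the identity;
    -- needle[0]/haystack[i] via pyGet? (Option equality; exact for in-range nonempty cases admitted by Pre_)
    let ids0 : List Int := (PySem.List.pyRange 0 (h.length : Int) 1).filter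
      (fun i => PySem.List.pyGet? n 0 == PySem.List.pyGet? h i)
    strStrLoop h n ids0
  else (-1)

def strStr (haystack : String) (needle : String) : Int :=
  strStrChars haystack.toList needle.toList

-- ===== PORT B =====
def strStr_alt (haystack : String) (needle : String) : Int :=
  PySem.Str.find haystack needle

-- ===== PRECONDITION & SPEC =====
-- Pre_ excludes exactly the empty needle: there A raises IndexError on needle[0] — except with an empty haystack,
-- where the candidate range is empty and A falls through to an accidental -1; B returns 0 (Python's find('') convention).
def Pre_strStr (haystack : String) (needle : String) : Prop := needle.toList ≠ []
instance (haystack : String) (needle : String) : Decidable (Pre_strStr haystack needle) := by unfold Pre_strStr; infer_instance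
def pvWitness_strStr : String × String := ("mississippi", "issip")

def Spec_strStr (haystack : String) (needle : String) (out : Int) : Prop := out = strStr_alt haystack needle
instance (haystack : String) (needle : String) (out : Int) : Decidable (Spec_strStr haystack needle out) := by unfold Spec_strStr; infer_instance

-- ===== CLAIM (what is proved, stated in full; the proofs are below) =====
def Claim_equal_strStr : Prop := ∀ (haystack : String) (needle : String), Dom_strStr haystack needle → Pre_strStr haystack needle → Spec_strStr haystack needle (strStr haystack needle)

-- ===== LEMMAS AND PROOFS =====

-- The candidate loop returns f when f is in the (strictly increasing) list, the slice test
-- holds at f, and fails at every earlier candidate.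
theorem strStrLoop_first (h n : List Char) (f : Int)
    (l : List Int) (hp : l.Pairwise (· < ·)) (hmem : f ∈ l)
    (hbefore : ∀ j ∈ l, j < f → PySem.List.slice h (some j) (some (j + (n.length : Int))) ≠ n)
    (hf : PySem.List.slice h (some f) (some (f + (n.length : Int))) = n) :
    strStrLoop h n l = f := by
  induction l with
  | nil => cases hmem
  | cons a rest ih =>
      rcases List.pairwise_cons.mp hp with ⟨ha, hp'⟩
      by_cases haf : a = f
      · subst haf
        simp [strStrLoop, hf]
      · have hfmem : f ∈ rest := by
          rcases List.mem_cons.mp hmem with h1 | h1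
          · exact absurd h1.symm haf
          · exact h1
        have halt : a < f := ha f hfmem
        have hna : PySem.List.slice h (some a) (some (a + (n.length : Int))) ≠ n :=
          hbefore a (List.mem_cons_self) halt
        simp only [strStrLoop, if_neg hna]
        exact ih hp' hfmem (fun j hj hjf => hbefore j (List.mem_cons_of_mem a hj) hjf)

-- prefix ↔ the slice haystack[j:j+len(needle)] equals needle (j a natural index)
theorem slice_eq_iff_prefix (h n : List Char) (j : Nat) :
    PySem.List.slice h (some (j : Int)) (some ((j : Int) + (n.length : Int))) = n ↔ n <+: h.drop j := by
  rw [PySem.List.slice_natCast_add]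
  constructor
  · intro he
    simpa [he] using List.take_prefix n.length (h.drop j)
  · intro hpre
    exact (List.prefix_iff_eq_take.mp hpre).symm

theorem strStrChars_eq_find (h n : List Char) (hn : n ≠ []) :
    strStrChars h n = PySem.Chars.find h n := by
  by_cases hin : PySem.Chars.isIn n h
  · -- found: find is nonneg and points at the first occurrence
    have hinfix : n <:+: h := (PySem.Chars.isIn_iff_infix n h).mp hin
    have hnonneg : 0 ≤ PySem.Chars.find h n := (PySem.Chars.find_nonneg_iff h n).mpr hinfix
    obtain ⟨hpre, hmin⟩ := PySem.Chars.find_spec (s := h) (sub := n) hnonneg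
    set f : Nat := (PySem.Chars.find h n).toNat with hfdef
    have hfle : f < h.length := by
      have hd : h.drop f ≠ [] := by
        intro hdrop
        rw [hdrop] at hpre
        exact hn (List.prefix_nil.mp hpre)
      by_contra hcon
      exact hd (List.drop_eq_nil_of_le (by omega))
    obtain ⟨c, rest, hc⟩ := List.exists_cons_of_ne_nil hn
    have hhead : PySem.List.pyGet? h (f : Int) = some c := by
      obtain ⟨t, ht⟩ := hpre
      have hdropf : h.drop f = c :: (rest ++ t) := by rw [← ht, hc]; simp
      have h0 : (List.drop f h)[0]? = some c := by rw [hdropf]; rfl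
      rw [List.getElem?_drop, Nat.add_zero] at h0
      rw [PySem.List.pyGet?_natCast]
      exact h0
    have hheadn : PySem.List.pyGet? n 0 = some c := by
      rw [hc]
      have h0 := PySem.List.pyGet?_natCast (c :: rest) 0
      simp only [Nat.cast_zero] at h0
      rw [h0]
      rfl
    -- f is a candidate
    have hmemr : (f : Int) ∈ PySem.List.pyRange 0 (h.length : Int) 1 := by
      rw [PySem.List.mem_pyRange_one]
      exact ⟨by positivity, by exact_mod_cast hfle⟩
    have hmem : (f : Int) ∈ (PySem.List.pyRange 0 (h.length : Int) 1).filter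
        (fun i => PySem.List.pyGet? n 0 == PySem.List.pyGet? h i) := by
      rw [List.mem_filter]
      refine ⟨hmemr, ?_⟩
      simp [hheadn, hhead]
    have hpair : ((PySem.List.pyRange 0 (h.length : Int) 1).filter
        (fun i => PySem.List.pyGet? n 0 == PySem.List.pyGet? h i)).Pairwise (· < ·) :=
      (PySem.List.pairwise_lt_pyRange_one 0 (h.length : Int)).filter _
    have hbefore : ∀ j ∈ (PySem.List.pyRange 0 (h.length : Int) 1).filter
        (fun i => PySem.List.pyGet? n 0 == PySem.List.pyGet? h i),
        j < (f : Int) → PySem.List.slice h (some j) (some (j + (n.length : Int))) ≠ n := by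
      intro j hj hjf hslice
      have hj0 : 0 ≤ j := ((PySem.List.mem_pyRange_one).mp (List.mem_filter.mp hj).1).1
      obtain ⟨k, rfl⟩ := Int.eq_ofNat_of_zero_le hj0
      have hk : k < f := by exact_mod_cast hjf
      exact hmin k hk ((slice_eq_iff_prefix h n k).mp hslice)
    have hfs : PySem.List.slice h (some (f : Int)) (some ((f : Int) + (n.length : Int))) = n :=
      (slice_eq_iff_prefix h n f).mpr hpre
    have := strStrLoop_first h n (f : Int) _ hpair hmem hbefore hfs
    rw [strStrChars, if_pos hin, this, hfdef, Int.toNat_of_nonneg hnonneg]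
  · -- not found: both sides are -1
    have : PySem.Chars.find h n = -1 :=
      (PySem.Chars.find_eq_neg_one_iff h n).mpr (fun hi => hin ((PySem.Chars.isIn_iff_infix n h).mpr hi))
    rw [strStrChars, if_neg hin, this]

-- ===== VERDICT (by name: the statement is the Claim_ definition above) =====
theorem strStr_spec : Claim_equal_strStr := by
  intro haystack needle _ hpre
  unfold Spec_strStr strStr strStr_alt
  rw [PySem.Str.find_eq]
  exact strStrChars_eq_find haystack.toList needle.toList hpre
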